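-- pv_equiv track=rewrite | github.com/ziyiwang726/chai_project | Gopalakrishnan/LLMCode/normalize_patient_direction.py | collect_signal
-- ===== SOURCE A (Python) =====
-- def collect_signal(values, positive_sign="+", negative_sign="-"):
--     cleaned = [v for v in values if v is not None]
--     if not cleaned:
--         return None
--     if all(v < 1 for v in cleaned):
--         return positive_sign
--     if all(v > 1 for v in cleaned):
--         return negative_sign
--     return None
-- ===== SOURCE B (Python) =====
-- def collect_signal(values, positive_sign="+", negative_sign="-"):
--     lo = hi = None
--     for v in values:
--         if v is None:
--             continue
--         if lo is None or v < lo: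
--             lo = v
--         if hi is None or v > hi:
--             hi = v
--     if hi is None:
--         return None
--     if hi < 1:
--         return positive_sign
--     if lo > 1:
--         return negative_sign
--     return None
-- ===== Notes on version B (the rewrite author's own statement) =====
-- stated objective: alternative
-- what changed: Instead of filtering into a list and running two all() scans, B tracks the running min and max of non-None values in one pass and decides by comparing the extremes to 1 (all v<1 iff max<1, all v>1 iff min>1).
import Mathlib
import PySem

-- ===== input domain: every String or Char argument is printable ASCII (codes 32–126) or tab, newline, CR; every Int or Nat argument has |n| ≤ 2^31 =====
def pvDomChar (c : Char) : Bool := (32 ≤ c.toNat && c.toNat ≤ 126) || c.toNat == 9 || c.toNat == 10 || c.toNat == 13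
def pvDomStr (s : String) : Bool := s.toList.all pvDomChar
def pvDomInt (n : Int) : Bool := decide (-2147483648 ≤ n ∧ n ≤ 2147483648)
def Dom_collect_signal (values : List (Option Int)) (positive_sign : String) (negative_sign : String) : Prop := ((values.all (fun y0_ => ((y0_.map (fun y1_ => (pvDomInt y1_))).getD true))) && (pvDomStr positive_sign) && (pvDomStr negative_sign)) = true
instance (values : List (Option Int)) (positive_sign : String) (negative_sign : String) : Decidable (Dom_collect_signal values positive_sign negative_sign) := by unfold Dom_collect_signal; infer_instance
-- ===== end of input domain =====

-- B tracks the running min/max of the non-None values in one pass and compares the extremes to 1, instead of filtering then running two all() scans (alternative algorithm, same result).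
-- ===== PORT A =====
def collect_signal (values : List (Option Int)) (positive_sign : String) (negative_sign : String) : Option String :=
  let cleaned := values.filterMap id
  if cleaned = [] then none
  else if cleaned.all (fun v => v < 1) then some positive_sign
  else if cleaned.all (fun v => v > 1) then some negative_sign
  else none

-- ===== PORT B =====
-- B: one pass maintaining (lo, hi) = running min and max of the non-None values.
def collect_signal_alt (values : List (Option Int)) (positive_sign : String) (negative_sign : String) : Option String :=
  let st := values.foldl (fun (st : Option Int × Option Int) v =>
    match v with
    | none => st
    | some v =>
      ((match st.1 with | none => some v | some lo => if v < lo then some v else some lo),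
       (match st.2 with | none => some v | some hi => if v > hi then some v else some hi)))
    (none, none)
  match st.2 with
  | none => none
  | some hi =>
    if hi < 1 then some positive_sign
    -- in Python `lo > 1`; lo is always some here (lo and hi become non-None together), getD only for totality
    else if 1 < st.1.getD 0 then some negative_sign
    else none

-- ===== PRECONDITION & SPEC =====
def Spec_collect_signal (values : List (Option Int)) (positive_sign : String) (negative_sign : String) (out : Option String) : Prop := out = collect_signal_alt values positive_sign negative_sign
instance (values : List (Option Int)) (positive_sign : String) (negative_sign : String) (out : Option String) : Decidable (Spec_collect_signal values positive_sign negative_sign out) := by unfold Spec_collect_signal; infer_instance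

-- ===== CLAIM (what is proved, stated in full; the proofs are below) =====
def Claim_equal_collect_signal : Prop := ∀ (values : List (Option Int)) (positive_sign : String) (negative_sign : String), Dom_collect_signal values positive_sign negative_sign → Spec_collect_signal values positive_sign negative_sign (collect_signal values positive_sign negative_sign)

-- ===== LEMMAS AND PROOFS =====
-- the fold over the Option list equals min/max accumulation over the cleaned list
lemma fold_minmax (values : List (Option Int)) (lo hi : Option Int) :
    values.foldl (fun (st : Option Int × Option Int) v =>
      match v with
      | none => st
      | some v =>
        ((match st.1 with | none => some v | some lo => if v < lo then some v else some lo),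
         (match st.2 with | none => some v | some hi => if v > hi then some v else some hi)))
      (lo, hi)
    = ((values.filterMap id).foldl (fun o v => some (min (o.getD v) v)) lo,
       (values.filterMap id).foldl (fun o v => some (max (o.getD v) v)) hi) := by
  induction values generalizing lo hi with
  | nil => simp
  | cons h t ih =>
    cases h with
    | none => simpa using ih lo hi
    | some v =>
      simp only [List.foldl_cons, List.filterMap_cons, id_eq, ih]
      congr 1
      · cases lo with
        | none => simp
        | some a =>
          by_cases hv : v < a
          · simp [hv, min_comm, min_eq_left (le_of_lt hv)]
          · simp [hv, min_eq_left (le_of_not_gt hv)]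
      · cases hi with
        | none => simp
        | some a =>
          by_cases hv : v > a
          · simp [hv, max_comm, max_eq_left (le_of_lt hv)]
          · simp [hv, max_eq_left (le_of_not_gt hv)]

lemma foldMax_some (xs : List Int) (a : Int) :
    xs.foldl (fun (o : Option Int) v => some (max (o.getD v) v)) (some a) = some (xs.foldl max a) := by
  induction xs generalizing a with
  | nil => rfl
  | cons x t ih => simp [ih]

lemma foldMin_some (xs : List Int) (a : Int) :
    xs.foldl (fun (o : Option Int) v => some (min (o.getD v) v)) (some a) = some (xs.foldl min a) := by
  induction xs generalizing a with
  | nil => rfl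
  | cons x t ih => simp [ih]

lemma foldMax_lt (xs : List Int) (a c : Int) :
    (xs.foldl max a < c) ↔ (a < c ∧ xs.all (fun v => decide (v < c))) := by
  induction xs generalizing a with
  | nil => simp
  | cons x t ih => simp [ih]; tauto

lemma foldMin_gt (xs : List Int) (a c : Int) :
    (c < xs.foldl min a) ↔ (c < a ∧ xs.all (fun v => decide (c < v))) := by
  induction xs generalizing a with
  | nil => simp
  | cons x t ih => simp [ih]; tauto

-- ===== VERDICT (by name: the statement is the Claim_ definition above) =====
theorem collect_signal_spec : Claim_equal_collect_signal := by
  intro values positive_sign negative_sign _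
  unfold Spec_collect_signal collect_signal collect_signal_alt
  simp only [fold_minmax]
  rcases hc : values.filterMap id with _ | ⟨x, xs⟩
  · simp
  · simp only [List.foldl_cons, Option.getD_none, min_self, max_self,
      foldMax_some, foldMin_some, Option.getD_some, foldMax_lt, foldMin_gt]
    by_cases h1 : x < 1 <;> by_cases h2 : xs.all (fun v => decide (v < 1)) <;>
      by_cases h3 : (1:Int) < x <;> by_cases h4 : xs.all (fun v => decide (1 < v)) <;>
      simp [h1, h2, h3, h4, List.all_cons]
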